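-- pv_equiv track=rewrite | github.com/duanasq/chiefbot | bot.py | min_energy_acc
-- ===== SOURCE A (Python) =====
-- def min_energy_acc(heights, min_energy_needed):
--     len_heights = len(heights)
--     if (len_heights == 0):
--         return min_energy_needed
--
--     last_hurdle = heights[len_heights-1]
--     starting_energy = min_energy_needed
--
--     while (is_energy_enough_for_next_jump(min_energy_needed, last_hurdle, starting_energy - 1)):
--         # I can probably optimise this to calculate the exact min starting energy I need
--         starting_energy = starting_energy -1
--
--     return min_energy_acc(heights[:-1], starting_energy)
--
-- def is_energy_enough_for_next_jump(min_energy_needed, prev_hurdle, starting_energy):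
--     if (starting_energy < prev_hurdle):
--         return False
--
--     boost = starting_energy - prev_hurdle
--     if (starting_energy + boost >= min_energy_needed):
--         return True
--     else:
--         return False
-- ===== SOURCE B (Python) =====
-- def min_energy_acc(heights, min_energy_needed):
--     e = min_energy_needed
--     for h in reversed(heights):
--         if e >= h:
--             e = (e + h + 1) // 2
--     return e
-- ===== Notes on version B (the rewrite author's own statement) =====
-- stated objective: faster
-- what changed: Replaces A's per-hurdle decrement-until-fail while loop plus recursion on a sliced copy of the list with a single reversed pass that applies the closed-form ceiling formula (e+h+1)//2 for each hurdle's threshold energy.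
import Mathlib
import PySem

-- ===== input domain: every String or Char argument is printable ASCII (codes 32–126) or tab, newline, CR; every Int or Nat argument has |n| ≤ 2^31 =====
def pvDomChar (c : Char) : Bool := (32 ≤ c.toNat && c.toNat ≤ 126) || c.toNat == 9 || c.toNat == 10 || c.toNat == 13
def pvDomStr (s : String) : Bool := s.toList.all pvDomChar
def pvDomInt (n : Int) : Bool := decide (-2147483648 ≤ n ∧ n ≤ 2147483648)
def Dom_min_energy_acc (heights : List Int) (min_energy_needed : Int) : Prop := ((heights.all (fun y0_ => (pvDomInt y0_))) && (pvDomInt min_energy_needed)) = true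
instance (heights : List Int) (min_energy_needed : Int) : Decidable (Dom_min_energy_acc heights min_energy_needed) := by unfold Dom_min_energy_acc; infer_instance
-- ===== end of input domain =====

-- B replaces A's per-hurdle decrement loop and recursion on list slices by one reversed
-- pass applying the closed-form ceiling threshold (e+h+1)//2 per hurdle (objective: faster).


-- ===== PORT A =====
def is_energy_enough_for_next_jump (min_energy_needed prev_hurdle starting_energy : Int) : Bool :=
  if starting_energy < prev_hurdle then false
  else
    let boost := starting_energy - prev_hurdle
    if starting_energy + boost ≥ min_energy_needed then true else false

lemma enough_iff (E h s : Int) :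
    is_energy_enough_for_next_jump E h s = true ↔ h ≤ s ∧ E ≤ 2 * s - h := by
  simp only [is_energy_enough_for_next_jump]
  split_ifs with h1 h2 <;> simp <;> omega

-- the 'while' loop of A as a recursive function on starting_energy
def minEnergyWhile (min_energy_needed last_hurdle starting_energy : Int) : Int :=
  if is_energy_enough_for_next_jump min_energy_needed last_hurdle (starting_energy - 1) then
    minEnergyWhile min_energy_needed last_hurdle (starting_energy - 1)
  else starting_energy
termination_by (starting_energy - last_hurdle).toNat
decreasing_by
  rename_i hcond
  rw [enough_iff] at hcond
  omega

def min_energy_acc (heights : List Int) (min_energy_needed : Int) : Int :=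
  if heights.length = 0 then min_energy_needed
  else
    -- heights[len_heights-1]: the index is always in range, so the default is never taken
    let last_hurdle := (PySem.List.pyGet? heights ((heights.length : Int) - 1)).getD 0
    let starting_energy := minEnergyWhile min_energy_needed last_hurdle min_energy_needed
    min_energy_acc (PySem.List.slice heights none (some (-1))) starting_energy
termination_by heights.length
decreasing_by
  rw [PySem.List.slice_to_neg_one]
  simp only [List.length_dropLast]
  omega

-- ===== PORT B =====
def min_energy_acc_alt (heights : List Int) (min_energy_needed : Int) : Int :=
  heights.reverse.foldl
    (fun e h => if e ≥ h then PySem.Int.floordiv (e + h + 1) 2 else e)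
    min_energy_needed

-- ===== PRECONDITION & SPEC =====
def Spec_min_energy_acc (heights : List Int) (min_energy_needed : Int) (out : Int) : Prop := out = min_energy_acc_alt heights min_energy_needed
instance (heights : List Int) (min_energy_needed : Int) (out : Int) : Decidable (Spec_min_energy_acc heights min_energy_needed out) := by unfold Spec_min_energy_acc; infer_instance

-- ===== CLAIM (what is proved, stated in full; the proofs are below) =====
def Claim_equal_min_energy_acc : Prop := ∀ (heights : List Int) (min_energy_needed : Int), Dom_min_energy_acc heights min_energy_needed → Spec_min_energy_acc heights min_energy_needed (min_energy_acc heights min_energy_needed)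

-- ===== LEMMAS AND PROOFS =====

-- A's while loop, started at or above the threshold (E+h+1)//2, stops exactly at it.
lemma while_char (E h : Int) (hE : h ≤ E) :
    ∀ n : ℕ, ∀ s : Int, (s - (E + h + 1) / 2).toNat = n → (E + h + 1) / 2 ≤ s →
      minEnergyWhile E h s = (E + h + 1) / 2 := by
  intro n
  induction n with
  | zero =>
    intro s h0 hle
    have hs : s = (E + h + 1) / 2 := by omega
    rw [minEnergyWhile.eq_def]
    have hfalse : is_energy_enough_for_next_jump E h (s - 1) = false := by
      rw [Bool.eq_false_iff]
      intro hc
      rw [enough_iff] at hc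
      omega
    rw [hfalse]
    simpa using hs
  | succ k ih =>
    intro s h0 hle
    have htrue : is_energy_enough_for_next_jump E h (s - 1) = true := by
      rw [enough_iff]
      omega
    rw [minEnergyWhile.eq_def, htrue]
    simp only [if_true]
    exact ih (s - 1) (by omega) (by omega)

-- one hurdle step: A's while loop started at E equals B's closed form
lemma while_step (E h : Int) :
    minEnergyWhile E h E = if E ≥ h then PySem.Int.floordiv (E + h + 1) 2 else E := by
  by_cases hE : h ≤ E
  · have hdiv : PySem.Int.floordiv (E + h + 1) 2 = (E + h + 1) / 2 :=
      PySem.Int.floordiv_eq_ediv_of_pos (by omega)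
    rw [if_pos hE, hdiv]
    exact while_char E h hE _ E rfl (by omega)
  · rw [if_neg hE, minEnergyWhile.eq_def]
    have hfalse : is_energy_enough_for_next_jump E h (E - 1) = false := by
      rw [Bool.eq_false_iff]
      intro hc
      rw [enough_iff] at hc
      omega
    rw [hfalse]
    simp

lemma A_eq_foldr (heights : List Int) :
    ∀ E : Int, min_energy_acc heights E =
      heights.foldr (fun h e => if e ≥ h then PySem.Int.floordiv (e + h + 1) 2 else e) E := by
  induction heights using List.reverseRecOn with
  | nil => intro E; rw [min_energy_acc.eq_def]; simp
  | append_singleton ys y ih =>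
    intro E
    rw [min_energy_acc.eq_def]
    have hlen : (ys ++ [y]).length ≠ 0 := by simp
    rw [if_neg hlen]
    have hgetcast : ((ys ++ [y]).length : Int) - 1 = ((ys.length : ℕ) : Int) := by
      simp
    have hget : (PySem.List.pyGet? (ys ++ [y]) (((ys ++ [y]).length : Int) - 1)).getD 0 = y := by
      rw [hgetcast, PySem.List.pyGet?_natCast, List.getElem?_concat_length]
      rfl
    rw [hget, PySem.List.slice_to_neg_one, List.dropLast_concat, ih, while_step,
      List.foldr_append]
    simp

-- ===== VERDICT (by name: the statement is the Claim_ definition above) =====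
theorem min_energy_acc_spec : Claim_equal_min_energy_acc := by
  intro heights E _
  unfold Spec_min_energy_acc min_energy_acc_alt
  rw [A_eq_foldr, List.foldl_reverse]
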